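-- pv_equiv track=rewrite | github.com/niccit/easy-remote | code.py | get_show_search_array
-- ===== SOURCE A (Python) =====
-- def get_show_search_array(show):
--     show_to_split = show.split()
--     show_to_split_length = len(show_to_split)
--     show_array = []
--     counter = 0
--     for word in show_to_split:
--         counter += 1
--         if counter < show_to_split_length:
--             show_array += list(word)
--             show_array += " "
--         else:
--             show_array += list(word)
--     return show_array
-- ===== SOURCE B (Python) =====
-- def get_show_search_array(show):
--     # Single character-level scan (finite-state machine): no split(), no join().
--     out = []
--     pending = False   # a word has ended and a separating space is still owed
--     in_word = False   # currently inside a word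
--     for ch in show:
--         if ch in " \t\n\r\x0b\x0c":
--             if in_word:
--                 in_word = False
--                 pending = True
--         else:
--             if pending:
--                 out.append(" ")
--                 pending = False
--             in_word = True
--             out.append(ch)
--     return out
-- ===== Notes on version B (the rewrite author's own statement) =====
-- stated objective: alternative
-- what changed: Replaces A's split-into-words loop (which re-interleaves per-word character extends with manual spaces under a last-word counter) by a single character-level finite-state machine over the raw string that never materialises the word list: it emits non-space characters directly and emits one deferred space when a new word starts after a finished one.
import Mathlib
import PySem

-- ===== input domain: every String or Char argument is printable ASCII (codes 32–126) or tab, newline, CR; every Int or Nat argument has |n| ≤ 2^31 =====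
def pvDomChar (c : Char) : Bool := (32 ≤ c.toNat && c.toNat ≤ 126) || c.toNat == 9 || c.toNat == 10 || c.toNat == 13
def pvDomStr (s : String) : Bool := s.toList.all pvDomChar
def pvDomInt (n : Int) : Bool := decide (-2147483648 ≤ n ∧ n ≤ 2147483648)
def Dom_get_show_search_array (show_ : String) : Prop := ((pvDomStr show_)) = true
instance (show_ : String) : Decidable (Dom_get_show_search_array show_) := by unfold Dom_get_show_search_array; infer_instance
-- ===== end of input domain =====

-- B replaces A's split-into-words loop by a single character-level state machine over the raw
-- string that never builds the word list (objective: alternative).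

-- ===== PORT A =====
-- one loop-body step of A (counter incremented, last-word guard chooses whether to append " ")
def pvStepA (n : Nat) (st : List String × Nat) (word : String) : List String × Nat :=
  let counter := st.2 + 1
  if counter < n then
    (st.1 ++ word.toList.map (fun c => String.ofList [c]) ++ [" "], counter)
  else
    (st.1 ++ word.toList.map (fun c => String.ofList [c]), counter)

def get_show_search_array (show_ : String) : List String :=
  let show_to_split := PySem.Str.split₀ show_
  let show_to_split_length := show_to_split.length
  (show_to_split.foldl (pvStepA show_to_split_length) ([], 0)).1

-- ===== PORT B =====
-- the whitespace characters B tests membership in: " \t\n\r\x0b\x0c"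
def pvSpaceChars : List Char := [' ', '\t', '\n', '\r', '\x0B', '\x0C']

-- one loop-body step of B's state machine; state = (out, pending, in_word)
def pvStepB (st : List String × Bool × Bool) (ch : Char) : List String × Bool × Bool :=
  if ch ∈ pvSpaceChars then
    if st.2.2 then (st.1, true, false) else st
  else
    ((if st.2.1 then st.1 ++ [" "] else st.1) ++ [String.ofList [ch]], false, true)

def get_show_search_array_alt (show_ : String) : List String :=
  (show_.toList.foldl pvStepB ([], false, false)).1

-- ===== PRECONDITION & SPEC =====
def Spec_get_show_search_array (show_ : String) (out : List String) : Prop := out = get_show_search_array_alt show_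
instance (show_ : String) (out : List String) : Decidable (Spec_get_show_search_array show_ out) := by unfold Spec_get_show_search_array; infer_instance

-- ===== CLAIM (what is proved, stated in full; the proofs are below) =====
def Claim_equal_get_show_search_array : Prop := ∀ (show_ : String), Dom_get_show_search_array show_ → Spec_get_show_search_array show_ (get_show_search_array show_)

-- ===== LEMMAS AND PROOFS =====

-- the common target: the space-joined word list, exploded into singleton strings
def pvJ (ws : List (List Char)) : List String :=
  (PySem.Chars.join [' '] ws).map (fun c => String.ofList [c])

-- A's loop, started with counter k and k + (remaining words) = total, appends exactly the
-- characters of the space-joined remaining words (each as a singleton string) to the accumulator.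
lemma pvLoopA_eq (n : Nat) (ws : List String) : ∀ (acc : List String) (k : Nat),
    k + ws.length = n →
    (ws.foldl (pvStepA n) (acc, k)).1
      = acc ++ (PySem.Chars.join [' '] (ws.map String.toList)).map (fun c => String.ofList [c]) := by
  induction ws with
  | nil =>
    intro acc k h
    simp [PySem.Chars.join_nil]
  | cons w ws ih =>
    intro acc k h
    cases ws with
    | nil =>
      have hnot : ¬ (k + 1 < n) := by simp at h; omega
      simp [pvStepA, hnot, PySem.Chars.join_singleton]
    | cons w' rest =>
      have hlt : k + 1 < n := by simp at h; omega
      have h' : (k + 1) + (w' :: rest).length = n := by simp at h ⊢; omega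
      calc ((w :: w' :: rest).foldl (pvStepA n) (acc, k)).1
          = ((w' :: rest).foldl (pvStepA n)
              (acc ++ w.toList.map (fun c => String.ofList [c]) ++ [" "], k + 1)).1 := by
            simp [List.foldl_cons, pvStepA, hlt]
        _ = acc ++ w.toList.map (fun c => String.ofList [c]) ++ [" "]
              ++ (PySem.Chars.join [' '] ((w' :: rest).map String.toList)).map
                   (fun c => String.ofList [c]) := ih _ _ h'
        _ = acc ++ (PySem.Chars.join [' '] ((w :: w' :: rest).map String.toList)).map
                   (fun c => String.ofList [c]) := by
            simp [PySem.Chars.join_cons_cons, List.map_append]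

-- on domain characters, B's membership test agrees with Python's str.split whitespace test
lemma pvMemSpace_eq (c : Char) (h : pvDomChar c = true) :
    decide (c ∈ pvSpaceChars) = PySem.Chars.isspace c := by
  have hn : c = Char.ofNat c.toNat := (Char.ofNat_toNat c).symm
  simp only [pvDomChar, Bool.or_eq_true, Bool.and_eq_true, decide_eq_true_eq, beq_iff_eq] at h
  have hmem : (c ∈ pvSpaceChars)
      ↔ (c.toNat = 32 ∨ c.toNat = 9 ∨ c.toNat = 10 ∨ c.toNat = 13 ∨ c.toNat = 11 ∨ c.toNat = 12) := by
    simp only [pvSpaceChars, List.mem_cons, List.not_mem_nil, or_false]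
    constructor
    · rintro (h' | h' | h' | h' | h' | h') <;> subst h' <;> decide
    · rintro (h' | h' | h' | h' | h' | h') <;> rw [hn, h'] <;> simp
  rw [Bool.eq_iff_iff, decide_eq_true_eq, hmem]
  simp only [PySem.Chars.isspace, Bool.or_eq_true, Bool.and_eq_true, decide_eq_true_eq]
  omega

-- the empty-input value of split's worker
lemma pvGo_nil (cur : List Char) (acc : List (List Char)) :
    PySem.Chars.split₀.go [] cur acc
      = if cur.isEmpty then acc.reverse else (cur.reverse :: acc).reverse := by
  simp [PySem.Chars.split₀.go]

-- join snoc characterisation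
lemma pvJoin_snoc (ws : List (List Char)) (w : List Char) :
    PySem.Chars.join [' '] (ws ++ [w])
      = if ws = [] then w else PySem.Chars.join [' '] ws ++ ' ' :: w := by
  induction ws with
  | nil => simp [PySem.Chars.join_singleton]
  | cons a ws ih =>
    cases ws with
    | nil => simp [PySem.Chars.join_cons_cons, PySem.Chars.join_singleton]
    | cons b rest =>
      simp only [List.cons_append, PySem.Chars.join_cons_cons] at *
      simp [ih]

-- appending a character to the last word appends the character to the exploded join
lemma pvJ_snoc_char (ws : List (List Char)) (w : List Char) (c : Char) :
    pvJ (ws ++ [w ++ [c]]) = pvJ (ws ++ [w]) ++ [String.ofList [c]] := by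
  unfold pvJ
  rw [pvJoin_snoc, pvJoin_snoc]
  by_cases h : ws = [] <;> simp [h]

-- starting a fresh one-character word after existing words appends a space and the character
lemma pvJ_snoc_new (ws : List (List Char)) (c : Char) (h : ws ≠ []) :
    pvJ (ws ++ [[c]]) = pvJ ws ++ [" ", String.ofList [c]] := by
  unfold pvJ
  rw [pvJoin_snoc]
  have h1 : (" " : String) = String.ofList [' '] := by decide
  simp [h, h1]

-- B's state machine, run from a state consistent with split's worker state (cur, acc),
-- produces the exploded join of the words split₀.go will deliver.
lemma pvLoopB_eq (cs : List Char) : ∀ (cur : List Char) (acc : List (List Char))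
    (out : List String) (pending : Bool),
    (∀ c ∈ cs, pvDomChar c = true) →
    out = pvJ (PySem.Chars.split₀.go [] cur acc) →
    ((pending = false ∧ (cur ≠ [] ∨ acc = [])) ∨ (pending = true ∧ cur = [] ∧ acc ≠ [])) →
    (cs.foldl pvStepB (out, pending, !cur.isEmpty)).1 = pvJ (PySem.Chars.split₀.go cs cur acc) := by
  induction cs with
  | nil =>
    intro cur acc out pending _ hout _
    simpa using hout
  | cons c rest ih =>
    intro cur acc out pending hdom hout hst
    have hdc : pvDomChar c = true := hdom c (by simp)
    have hdrest : ∀ x ∈ rest, pvDomChar x = true := fun x hx => hdom x (by simp [hx])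
    by_cases hs : c ∈ pvSpaceChars
    · have hsp : PySem.Chars.isspace c = true := by
        rw [← pvMemSpace_eq c hdc]; simpa using hs
      by_cases hcur : cur = []
      · subst hcur
        have hgo : PySem.Chars.split₀.go (c :: rest) [] acc
            = PySem.Chars.split₀.go rest [] acc := by
          simp [PySem.Chars.split₀.go, hsp]
        rw [hgo, List.foldl_cons]
        have hstep : pvStepB (out, pending, !(List.isEmpty ([] : List Char))) c
            = (out, pending, !(List.isEmpty ([] : List Char))) := by
          simp [pvStepB, hs]
        rw [hstep]
        exact ih [] acc out pending hdrest hout hst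
      · have hgo : PySem.Chars.split₀.go (c :: rest) cur acc
            = PySem.Chars.split₀.go rest [] (cur.reverse :: acc) := by
          simp [PySem.Chars.split₀.go, hsp, hcur]
        rw [hgo, List.foldl_cons]
        have hstep : pvStepB (out, pending, !cur.isEmpty) c = (out, true, false) := by
          simp [pvStepB, hs, hcur]
        rw [hstep]
        have hout' : out = pvJ (PySem.Chars.split₀.go [] [] (cur.reverse :: acc)) := by
          rw [pvGo_nil] at hout ⊢
          simpa [hcur] using hout
        have := ih [] (cur.reverse :: acc) out true hdrest hout' (Or.inr ⟨rfl, rfl, by simp⟩)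
        simpa using this
    · have hsp : PySem.Chars.isspace c = false := by
        rw [← pvMemSpace_eq c hdc]; simp [hs]
      have hgo : PySem.Chars.split₀.go (c :: rest) cur acc
          = PySem.Chars.split₀.go rest (c :: cur) acc := by
        simp [PySem.Chars.split₀.go, hsp]
      rw [hgo, List.foldl_cons]
      have hstep : pvStepB (out, pending, !cur.isEmpty) c
          = ((if pending then out ++ [" "] else out) ++ [String.ofList [c]], false, true) := by
        simp [pvStepB, hs]
      rw [hstep]
      have hout' : (if pending then out ++ [" "] else out) ++ [String.ofList [c]]
          = pvJ (PySem.Chars.split₀.go [] (c :: cur) acc) := by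
        rw [pvGo_nil]
        simp only [List.isEmpty_cons, Bool.false_eq_true, if_false]
        rcases hst with ⟨hp, hca⟩ | ⟨hp, hc0, ha⟩
        · subst hp
          rw [if_neg (by simp)]
          rcases hca with hc | ha
          · rw [pvGo_nil] at hout
            rw [if_neg (by simp [hc])] at hout
            rw [hout]
            have : (c :: cur).reverse = cur.reverse ++ [c] := by simp
            simp only [List.reverse_cons, this]
            rw [← pvJ_snoc_char acc.reverse cur.reverse c]
          · subst ha
            rw [pvGo_nil] at hout
            by_cases hc : cur = []
            · subst hc
              simp only [List.isEmpty_nil, if_true, List.reverse_nil] at hout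
              have h0 : pvJ ([] : List (List Char)) = [] := by
                simp [pvJ, PySem.Chars.join_nil]
              rw [hout, h0]
              simp [pvJ, PySem.Chars.join_singleton]
            · rw [if_neg (by simp [hc])] at hout
              rw [hout]
              simpa using (pvJ_snoc_char [] cur.reverse c).symm
        · subst hp; subst hc0
          rw [if_pos rfl]
          rw [pvGo_nil] at hout
          simp only [List.isEmpty_nil, if_true] at hout
          rw [hout]
          simp only [List.reverse_cons, List.reverse_nil, List.nil_append]
          rw [pvJ_snoc_new acc.reverse c (by simpa using ha)]
          simp
      rw [hout']
      have := ih (c :: cur) acc _ false hdrest rfl (Or.inl ⟨rfl, Or.inl (by simp)⟩)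
      simpa using this

-- ===== VERDICT (by name: the statement is the Claim_ definition above) =====
theorem get_show_search_array_spec : Claim_equal_get_show_search_array := by
  intro show_ hdom
  unfold Spec_get_show_search_array get_show_search_array get_show_search_array_alt
  rw [pvLoopA_eq _ _ [] 0 (by simp)]
  have hdomc : ∀ c ∈ show_.toList, pvDomChar c = true := by
    have := hdom
    unfold Dom_get_show_search_array pvDomStr at this
    simpa [List.all_eq_true] using this
  have hB := pvLoopB_eq show_.toList [] [] [] false hdomc
      (by simp [pvGo_nil, pvJ, PySem.Chars.join_nil]) (Or.inl ⟨rfl, Or.inr rfl⟩)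
  simp only [List.isEmpty_nil, Bool.not_true] at hB
  rw [hB]
  have hwords : (PySem.Str.split₀ show_).map String.toList = PySem.Chars.split₀ show_.toList := by
    simp [PySem.Str.split₀, List.map_map, Function.comp_def]
  rw [hwords]
  simp [pvJ, PySem.Chars.split₀]
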